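-- pv_equiv track=rewrite | github.com/yotaroy/bridge_env | bridge_env/score.py | point_difference_to_imps
-- ===== SOURCE A (Python) =====
-- _IMPS_LIST = (20, 50, 90, 130, 170,
--               220, 270, 320, 370, 430,
--               500, 600, 750, 900, 1100,
--               1300, 1500, 1750, 2000, 2250,
--               2500, 3000, 3500, 4000)
--
-- def point_difference_to_imps(point_difference: int) -> int:
--     win: bool = point_difference >= 0
--     imps = 0
--     while imps < 24:
--         if abs(point_difference) < _IMPS_LIST[imps]:
--             break
--         imps += 1
--     return imps if win else -imps
-- ===== SOURCE B (Python) =====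
-- _IMPS_LIST = (20, 50, 90, 130, 170,
--               220, 270, 320, 370, 430,
--               500, 600, 750, 900, 1100,
--               1300, 1500, 1750, 2000, 2250,
--               2500, 3000, 3500, 4000)
--
-- def point_difference_to_imps(point_difference: int) -> int:
--     # binary search: number of thresholds <= abs(point_difference)
--     # (a hand-written bisect_right, since A imports no modules)
--     a = abs(point_difference)
--     lo, hi = 0, len(_IMPS_LIST)
--     while lo < hi:
--         mid = (lo + hi) // 2
--         if a < _IMPS_LIST[mid]:
--             hi = mid
--         else:
--             lo = mid + 1
--     return lo if point_difference >= 0 else -lo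
-- ===== Notes on version B (the rewrite author's own statement) =====
-- stated objective: alternative
-- what changed: Replaces A's linear scan over the sorted IMP threshold table with a hand-written binary search (bisect_right), applying the sign afterwards.
import Mathlib
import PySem

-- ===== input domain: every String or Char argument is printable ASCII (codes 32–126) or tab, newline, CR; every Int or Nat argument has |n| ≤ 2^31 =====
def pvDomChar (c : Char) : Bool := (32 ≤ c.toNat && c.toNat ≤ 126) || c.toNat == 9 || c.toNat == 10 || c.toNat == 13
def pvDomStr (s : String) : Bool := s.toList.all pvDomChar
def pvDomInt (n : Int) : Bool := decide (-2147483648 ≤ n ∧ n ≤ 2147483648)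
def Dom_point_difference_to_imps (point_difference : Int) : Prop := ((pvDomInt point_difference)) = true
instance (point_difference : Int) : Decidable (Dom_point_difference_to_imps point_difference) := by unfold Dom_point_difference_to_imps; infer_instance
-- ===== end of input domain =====

-- B replaces A's linear scan of the 24 sorted IMP thresholds with a hand-written binary search (bisect_right); same value everywhere.

def pvImpsList : List Int :=
  [20, 50, 90, 130, 170, 220, 270, 320, 370, 430,
   500, 600, 750, 900, 1100, 1300, 1500, 1750, 2000, 2250,
   2500, 3000, 3500, 4000]

-- ===== PORT A =====
-- A's while loop: imps starts at 0, runs while imps < 24, breaks when |pd| < _IMPS_LIST[imps]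
def pvLoopA (pd : Int) (imps : Nat) : Nat :=
  if imps < 24 then
    if |pd| < pvImpsList.getD imps 0 then imps
    else pvLoopA pd (imps + 1)
  else imps
termination_by 24 - imps

def point_difference_to_imps (point_difference : Int) : Int :=
  let win : Bool := point_difference ≥ 0
  let imps := pvLoopA point_difference 0
  if win then (imps : Int) else -(imps : Int)

-- ===== PORT B =====
-- B's while loop: hand-written bisect_right over the same sorted list
def pvBisect (a : Int) (lo hi : Nat) : Nat :=
  if lo < hi then
    let mid := (lo + hi) / 2
    if a < pvImpsList.getD mid 0 then pvBisect a lo mid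
    else pvBisect a (mid + 1) hi
  else lo
termination_by hi - lo

def point_difference_to_imps_alt (point_difference : Int) : Int :=
  let a := |point_difference|
  let lo := pvBisect a 0 24
  if point_difference ≥ 0 then (lo : Int) else -(lo : Int)

-- ===== PRECONDITION & SPEC =====
def Spec_point_difference_to_imps (point_difference : Int) (out : Int) : Prop := out = point_difference_to_imps_alt point_difference
instance (point_difference : Int) (out : Int) : Decidable (Spec_point_difference_to_imps point_difference out) := by unfold Spec_point_difference_to_imps; infer_instance

-- ===== CLAIM (what is proved, stated in full; the proofs are below) =====
def Claim_equal_point_difference_to_imps : Prop := ∀ (point_difference : Int), Dom_point_difference_to_imps point_difference → Spec_point_difference_to_imps point_difference (point_difference_to_imps point_difference)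

-- ===== LEMMAS AND PROOFS =====

-- both loops compute the unique r ≤ 24 with: thresholds below r are ≤ a, thresholds from r on are > a
def pvP (a : Int) (r : Nat) : Prop :=
  r ≤ 24 ∧ (∀ j, j < r → pvImpsList.getD j 0 ≤ a) ∧ (∀ j, r ≤ j → j < 24 → a < pvImpsList.getD j 0)

theorem pvP_uniq {a : Int} {r1 r2 : Nat} (h1 : pvP a r1) (h2 : pvP a r2) : r1 = r2 := by
  by_contra hne
  rcases Nat.lt_or_ge r1 r2 with h | h
  · exact absurd (h2.2.1 r1 h) (not_le.mpr (h1.2.2 r1 (le_refl _) (lt_of_lt_of_le h h2.1)))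
  · rcases Nat.lt_or_ge r2 r1 with h' | h'
    · exact absurd (h1.2.1 r2 h') (not_le.mpr (h2.2.2 r2 (le_refl _) (lt_of_lt_of_le h' h1.1)))
    · exact hne (Nat.le_antisymm h' h)

theorem pvSorted : ∀ j, j < 24 → ∀ i, i ≤ j → pvImpsList.getD i 0 ≤ pvImpsList.getD j 0 := by decide

theorem pvLoopA_P (pd : Int) : ∀ n imps, 24 - imps ≤ n → imps ≤ 24 →
    (∀ j, j < imps → pvImpsList.getD j 0 ≤ |pd|) → pvP |pd| (pvLoopA pd imps) := by
  intro n
  induction n with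
  | zero =>
    intro imps hn h24 hlo
    have : imps = 24 := by omega
    subst this
    rw [pvLoopA]
    simp only [Nat.lt_irrefl, if_false]
    exact ⟨le_refl _, hlo, fun j hj hj24 => absurd hj (by omega)⟩
  | succ n ih =>
    intro imps hn h24 hlo
    rw [pvLoopA]
    by_cases hlt : imps < 24
    · simp only [hlt, if_true]
      by_cases hbr : |pd| < pvImpsList.getD imps 0
      · simp only [hbr, if_true]
        refine ⟨le_of_lt hlt, hlo, fun j hj hj24 => lt_of_lt_of_le hbr (pvSorted j hj24 imps hj)⟩
      · simp only [hbr, if_false]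
        exact ih (imps + 1) (by omega) (by omega)
          (fun j hj => by
            rcases Nat.lt_or_ge j imps with h | h
            · exact hlo j h
            · have : j = imps := by omega
              subst this; exact not_lt.mp hbr)
    · simp only [hlt, if_false]
      have he : imps = 24 := by omega
      subst he
      exact ⟨le_refl _, hlo, fun j hj hj24 => absurd hj (by omega)⟩

theorem pvBisect_P (a : Int) : ∀ n lo hi, hi - lo ≤ n → lo ≤ hi → hi ≤ 24 →
    (∀ j, j < lo → pvImpsList.getD j 0 ≤ a) → (∀ j, hi ≤ j → j < 24 → a < pvImpsList.getD j 0) →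
    pvP a (pvBisect a lo hi) := by
  intro n
  induction n with
  | zero =>
    intro lo hi hn hle h24 hlo hhi
    have : lo = hi := by omega
    subst this
    rw [pvBisect]
    simp only [Nat.lt_irrefl, if_false]
    exact ⟨h24, hlo, hhi⟩
  | succ n ih =>
    intro lo hi hn hle h24 hlo hhi
    rw [pvBisect]
    by_cases hlt : lo < hi
    · simp only [hlt, if_true]
      have hmid1 : lo ≤ (lo + hi) / 2 := by omega
      have hmid2 : (lo + hi) / 2 < hi := by omega
      by_cases hc : a < pvImpsList.getD ((lo + hi) / 2) 0
      · simp only [hc, if_true]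
        exact ih lo ((lo + hi) / 2) (by omega) hmid1 (by omega) hlo
          (fun j hj hj24 => lt_of_lt_of_le hc (pvSorted j hj24 _ hj))
      · simp only [hc, if_false]
        exact ih ((lo + hi) / 2 + 1) hi (by omega) (by omega) h24
          (fun j hj => by
            rcases Nat.lt_or_ge j ((lo + hi) / 2) with h | h
            · exact le_trans (pvSorted _ (by omega) j (le_of_lt h)) (not_lt.mp hc)
            · have : j = (lo + hi) / 2 := by omega
              subst this; exact not_lt.mp hc)
          hhi
    · simp only [hlt, if_false]
      exact ⟨by omega, fun j hj => hlo j hj, fun j hj hj24 => hhi j (by omega) hj24⟩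

theorem pvLoop_eq (pd : Int) : pvLoopA pd 0 = pvBisect |pd| 0 24 :=
  pvP_uniq
    (pvLoopA_P pd 24 0 (by omega) (by omega) (fun j hj => absurd hj (Nat.not_lt_zero j)))
    (pvBisect_P |pd| 24 0 24 (by omega) (by omega) (le_refl _)
      (fun j hj => absurd hj (Nat.not_lt_zero j)) (fun j hj hj24 => absurd hj24 (by omega)))

-- ===== VERDICT (by name: the statement is the Claim_ definition above) =====
theorem point_difference_to_imps_spec : Claim_equal_point_difference_to_imps := by
  intro pd _
  unfold Spec_point_difference_to_imps point_difference_to_imps point_difference_to_imps_alt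
  by_cases h : pd ≥ 0 <;> simp [pvLoop_eq, h]
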